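-- pv_equiv track=rewrite | github.com/AnveshAI/AnveshAI-Video-Generator-V2 | video_engine/dsl_parser.py | tokenize_line
-- ===== SOURCE A (Python) =====
-- from typing import List, Optional, Tuple, Dict, Any
--
-- def tokenize_line(line: str) -> List[str]:
--     tokens = []
--     current = ""
--     in_quotes = False
--
--     for char in line:
--         if char == '"' and not in_quotes:
--             in_quotes = True
--         elif char == '"' and in_quotes:
--             in_quotes = False
--             tokens.append(current)
--             current = ""
--         elif char == ' ' and not in_quotes:
--             if current:
--                 tokens.append(current)
--                 current = ""
--         else:
--             current += char
--
--     if current: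
--         tokens.append(current)
--
--     return tokens
-- ===== SOURCE B (Python) =====
-- def tokenize_line(line):
--     segments = line.split('"')
--     tokens = []
--     current = ""
--     for i, seg in enumerate(segments):
--         if i % 2 == 0:
--             for ch in seg:
--                 if ch == ' ':
--                     if current:
--                         tokens.append(current)
--                         current = ""
--                 else:
--                     current += ch
--         else:
--             current += seg
--             if i != len(segments) - 1:
--                 tokens.append(current)
--                 current = ""
--     if current:
--         tokens.append(current)
--     return tokens
-- ===== Notes on version B (the rewrite author's own statement) =====
-- stated objective: alternative
-- what changed: B replaces A's character-by-character scan with an in_quotes state flag by splitting the line at double-quote characters into alternating outside/inside-quote segments and folding over them with index parity, flushing a quoted token whenever a real closing quote followed.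
import Mathlib
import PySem

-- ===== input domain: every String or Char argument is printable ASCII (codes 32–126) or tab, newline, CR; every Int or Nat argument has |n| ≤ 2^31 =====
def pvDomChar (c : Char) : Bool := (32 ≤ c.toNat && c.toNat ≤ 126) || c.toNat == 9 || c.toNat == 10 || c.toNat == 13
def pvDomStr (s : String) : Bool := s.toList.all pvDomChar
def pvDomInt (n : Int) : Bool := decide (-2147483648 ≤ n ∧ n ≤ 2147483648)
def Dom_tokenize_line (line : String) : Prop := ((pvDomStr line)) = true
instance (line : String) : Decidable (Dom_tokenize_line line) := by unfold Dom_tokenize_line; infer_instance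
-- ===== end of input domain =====

-- B re-implements the tokenizer by splitting the line on '"' into alternating outside/inside-quote
-- segments instead of tracking an in_quotes flag (objective: alternative decomposition, same cost).

-- ===== PORT A =====
-- state = (tokens, current, in_quotes); one step of A's for-loop, branch for branch
def tlStepA (st : List String × List Char × Bool) (c : Char) : List String × List Char × Bool :=
  let (tokens, current, inq) := st
  if c = '"' ∧ inq = false then (tokens, current, true)
  else if c = '"' ∧ inq = true then (tokens ++ [String.mk current], [], false)
  else if c = ' ' ∧ inq = false then
    (if current ≠ [] then (tokens ++ [String.mk current], [], false) else st)
  else (tokens, current ++ [c], inq)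

def tokenize_line (line : String) : List String :=
  let st := line.toList.foldl tlStepA ([], [], false)
  if st.2.1 ≠ [] then st.1 ++ [String.mk st.2.1] else st.1

-- ===== PORT B =====
-- inner loop of Source B for an even (outside-quotes) segment, char by char
def tlStepEven (st : List String × List Char) (c : Char) : List String × List Char :=
  let (tokens, current) := st
  if c = ' ' then (if current ≠ [] then (tokens ++ [String.mk current], []) else st)
  else (tokens, current ++ [c])

-- body of Source B's enumerate loop: n = len(segments), p = (i, seg)
def tlStepB (n : Nat) (st : List String × List Char) (p : Int × List Char) : List String × List Char :=
  if p.1 % 2 = 0 then p.2.foldl tlStepEven st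
  else
    let current := st.2 ++ p.2
    if p.1 ≠ (n : Int) - 1 then (st.1 ++ [String.mk current], []) else (st.1, current)

def tokenize_line_alt (line : String) : List String :=
  let segments := PySem.Chars.splitOn line.toList ['"']
  let st := (PySem.List.enumerate segments).foldl (tlStepB segments.length) ([], [])
  if st.2 ≠ [] then st.1 ++ [String.mk st.2] else st.1

-- ===== PRECONDITION & SPEC =====
def Spec_tokenize_line (line : String) (out : List String) : Prop := out = tokenize_line_alt line
instance (line : String) (out : List String) : Decidable (Spec_tokenize_line line out) := by unfold Spec_tokenize_line; infer_instance

-- ===== CLAIM (what is proved, stated in full; the proofs are below) =====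
def Claim_equal_tokenize_line : Prop := ∀ (line : String), Dom_tokenize_line line → Spec_tokenize_line line (tokenize_line line)

-- ===== LEMMAS AND PROOFS =====

-- proof-side simple recursive model of str.split('"')
def tlSplit : List Char → List Char → List (List Char)
  | [], cur => [cur.reverse]
  | c :: rest, cur => if c = '"' then cur.reverse :: tlSplit rest [] else tlSplit rest (c :: cur)

theorem tlSplit_go (fuel : Nat) (l cur : List Char) (acc : List (List Char))
    (h : l.length ≤ fuel) :
    PySem.Chars.splitOn.go ['"'] fuel l cur acc = acc.reverse ++ tlSplit l cur := by
  induction fuel generalizing l cur acc with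
  | zero =>
    cases l with
    | nil => simp [PySem.Chars.splitOn.go, tlSplit]
    | cons c rest => simp at h
  | succ n ih =>
    cases l with
    | nil => simp [PySem.Chars.splitOn.go, tlSplit]
    | cons c rest =>
      simp only [PySem.Chars.splitOn.go]
      by_cases hc : c = '"'
      · subst hc
        rw [if_pos (by simp [List.isPrefixOf])]
        simp only [List.length_cons, Nat.succ_le_succ_iff] at h
        rw [ih _ _ _ (by simpa using h)]
        simp [tlSplit]
      · rw [if_neg (by simp [List.isPrefixOf, Ne.symm hc])]
        simp only [List.length_cons, Nat.succ_le_succ_iff] at h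
        rw [ih _ _ _ h]
        simp [tlSplit, hc]

theorem splitOn_eq_tlSplit (l : List Char) :
    PySem.Chars.splitOn l ['"'] = tlSplit l [] := by
  unfold PySem.Chars.splitOn
  rw [tlSplit_go _ _ _ _ (by omega)]
  simp

theorem tlSplit_ne_nil (l cur : List Char) : tlSplit l cur ≠ [] := by
  induction l generalizing cur with
  | nil => simp [tlSplit]
  | cons c rest ih => by_cases hc : c = '"' <;> simp [tlSplit, hc, ih]

-- join with '"' undoes tlSplit
def tlJoin : List (List Char) → List Char
  | [] => []
  | [s] => s
  | s :: rest => s ++ '"' :: tlJoin rest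

theorem tlJoin_cons (a : List Char) (S : List (List Char)) (h : S ≠ []) :
    tlJoin (a :: S) = a ++ '"' :: tlJoin S := by
  cases S with
  | nil => exact absurd rfl h
  | cons x xs => rfl

theorem tlJoin_tlSplit (l cur : List Char) : tlJoin (tlSplit l cur) = cur.reverse ++ l := by
  induction l generalizing cur with
  | nil => simp [tlSplit, tlJoin]
  | cons c rest ih =>
    by_cases hc : c = '"'
    · subst hc
      rw [show tlSplit ('"' :: rest) cur = cur.reverse :: tlSplit rest [] by simp [tlSplit]]
      rw [tlJoin_cons _ _ (tlSplit_ne_nil rest []), ih []]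
      simp
    · rw [show tlSplit (c :: rest) cur = tlSplit rest (c :: cur) by simp [tlSplit, hc]]
      rw [ih (c :: cur)]
      simp

theorem tlSplit_no_quote (l cur : List Char) (hc : '"' ∉ cur) :
    ∀ seg ∈ tlSplit l cur, '"' ∉ seg := by
  induction l generalizing cur with
  | nil => simpa [tlSplit] using hc
  | cons c rest ih =>
    by_cases h : c = '"'
    · subst h
      rw [show tlSplit ('"' :: rest) cur = cur.reverse :: tlSplit rest [] by simp [tlSplit]]
      intro seg hseg
      rcases List.mem_cons.mp hseg with rfl | hm
      · simpa using hc
      · exact ih [] (by simp) seg hm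
    · rw [show tlSplit (c :: rest) cur = tlSplit rest (c :: cur) by simp [tlSplit, h]]
      apply ih
      intro hm
      rcases List.mem_cons.mp hm with h1 | h2
      · exact h h1.symm
      · exact hc h2

-- A's fold across a quote-free segment, outside quotes, is B's even-segment scan
theorem foldA_even (seg : List Char) (t : List String) (c : List Char) (h : '"' ∉ seg) :
    seg.foldl tlStepA (t, c, false) =
      ((seg.foldl tlStepEven (t, c)).1, (seg.foldl tlStepEven (t, c)).2, false) := by
  induction seg generalizing t c with
  | nil => simp
  | cons x rest ih =>
    simp only [List.mem_cons, not_or] at h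
    obtain ⟨hx, hrest⟩ := h
    by_cases hs : x = ' '
    · subst hs
      by_cases hc : c = []
      · subst hc
        simpa [tlStepA, tlStepEven, hx] using ih t [] hrest
      · simpa [tlStepA, tlStepEven, hx, hc] using ih (t ++ [String.mk c]) [] hrest
    · simpa [tlStepA, tlStepEven, Ne.symm hx, hs] using ih t (c ++ [x]) hrest

-- A's fold across a quote-free segment, inside quotes, just appends it to current
theorem foldA_odd (seg : List Char) (t : List String) (c : List Char) (h : '"' ∉ seg) :
    seg.foldl tlStepA (t, c, true) = (t, c ++ seg, true) := by
  induction seg generalizing c with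
  | nil => simp
  | cons x rest ih =>
    simp only [List.mem_cons, not_or] at h
    obtain ⟨hx, hrest⟩ := h
    by_cases hs : x = ' '
    · subst hs
      simpa [tlStepA, hx] using ih (c ++ [' ']) hrest
    · simpa [tlStepA, Ne.symm hx, hs] using ih (c ++ [x]) hrest

-- proof-side structural model of B's enumerate loop: even segment, then (unless last) a flushed odd one
def tlGo : List (List Char) → List String × List Char → List String × List Char
  | [], st => st
  | [e], st => e.foldl tlStepEven st
  | e :: o :: rest2, st =>
    let st1 := e.foldl tlStepEven st
    if rest2 = [] then (st1.1, st1.2 ++ o)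
    else tlGo rest2 (st1.1 ++ [String.mk (st1.2 ++ o)], [])

def tlFinish (st : List String × List Char) : List String :=
  if st.2 ≠ [] then st.1 ++ [String.mk st.2] else st.1

-- step-lemmas for tlStepB's three branches
theorem tlStepB_even (n : Nat) (st : List String × List Char) (i : Int) (seg : List Char)
    (h : i % 2 = 0) : tlStepB n st (i, seg) = seg.foldl tlStepEven st := by
  simp [tlStepB, h]

theorem tlStepB_odd_flush (n : Nat) (st : List String × List Char) (i : Int) (seg : List Char)
    (h : ¬ i % 2 = 0) (h2 : i ≠ (n : Int) - 1) :
    tlStepB n st (i, seg) = (st.1 ++ [String.mk (st.2 ++ seg)], []) := by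
  simp only [tlStepB, if_neg h]
  rw [if_pos h2]

theorem tlStepB_odd_last (n : Nat) (st : List String × List Char) (i : Int) (seg : List Char)
    (h : ¬ i % 2 = 0) (h2 : i = (n : Int) - 1) :
    tlStepB n st (i, seg) = (st.1, st.2 ++ seg) := by
  simp only [tlStepB, if_neg h]
  rw [if_neg (by simpa using h2)]

-- B's enumerate fold equals tlGo (generalized over the start index 2*k)
theorem foldB_eq_tlGo (n : Nat) (segs : List (List Char)) (st : List String × List Char) :
    ∀ (k : Nat), n = 2 * k + segs.length →
    (PySem.List.enumerate segs ((2 * k : Nat) : Int)).foldl (tlStepB n) st = tlGo segs st := by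
  induction segs, st using tlGo.induct with
  | case1 st =>
    intro k hn
    simp [PySem.List.enumerate, tlGo]
  | case2 e st =>
    intro k hn
    simp only [PySem.List.enumerate, List.foldl_cons, List.foldl_nil, tlGo]
    rw [tlStepB_even n st (((2 * k : Nat)) : Int) e (by push_cast; omega)]
  | case3 e o st =>
    intro k hn
    simp only [List.length_cons, List.length_nil] at hn
    simp only [PySem.List.enumerate, List.foldl_cons, List.foldl_nil]
    rw [tlStepB_even n st (((2 * k : Nat)) : Int) e (by push_cast; omega)]
    rw [tlStepB_odd_last n _ ((((2 * k : Nat)) : Int) + 1) o (by push_cast; omega)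
          (by push_cast; omega)]
    simp [tlGo]
  | case4 e o rest2 st st1 hr ih =>
    intro k hn
    simp only [List.length_cons] at hn
    have hlen : 1 ≤ rest2.length := by
      cases rest2 with
      | nil => exact absurd rfl hr
      | cons a b => simp
    simp only [PySem.List.enumerate, List.foldl_cons]
    rw [tlStepB_even n st (((2 * k : Nat)) : Int) e (by push_cast; omega)]
    rw [tlStepB_odd_flush n _ ((((2 * k : Nat)) : Int) + 1) o (by push_cast; omega)
          (by push_cast; omega)]
    rw [show tlGo (e :: o :: rest2) st = tlGo rest2
          ((e.foldl tlStepEven st).1 ++ [String.mk ((e.foldl tlStepEven st).2 ++ o)], []) by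
        simp [tlGo, hr]]
    have h2 := ih (k + 1) (by omega)
    rw [show ((2 * k : Nat) : Int) + 1 + 1 = ((2 * (k + 1) : Nat) : Int) by push_cast; ring]
    exact h2

-- A's char loop over the join of quote-free segments matches tlGo, up to the final flush
theorem tlGo_correct (segs : List (List Char)) (st : List String × List Char)
    (hq : ∀ seg ∈ segs, '"' ∉ seg) :
    tlFinish ((((tlJoin segs).foldl tlStepA (st.1, st.2, false)).1,
               ((tlJoin segs).foldl tlStepA (st.1, st.2, false)).2.1)) =
    tlFinish (tlGo segs st) := by
  induction segs, st using tlGo.induct with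
  | case1 st => simp [tlJoin, tlGo]
  | case2 e st =>
    simp only [tlJoin, tlGo]
    rw [foldA_even e st.1 st.2 (hq e (by simp))]
  | case3 e o st =>
    have hqe : '"' ∉ e := hq e (by simp)
    have hqo : '"' ∉ o := hq o (by simp)
    rw [tlJoin_cons e [o] (by simp)]
    simp only [List.foldl_append, List.foldl_cons, tlJoin, tlGo]
    rw [foldA_even e st.1 st.2 hqe]
    rw [show tlStepA ((e.foldl tlStepEven (st.1, st.2)).1, (e.foldl tlStepEven (st.1, st.2)).2, false) '"'
          = ((e.foldl tlStepEven (st.1, st.2)).1, (e.foldl tlStepEven (st.1, st.2)).2, true) by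
        simp [tlStepA]]
    rw [foldA_odd o _ _ hqo]
    simp [tlGo, tlFinish]
  | case4 e o rest2 st st1 hr ih =>
    have hqe : '"' ∉ e := hq e (by simp)
    have hqo : '"' ∉ o := hq o (by simp)
    rw [tlJoin_cons e (o :: rest2) (by simp)]
    simp only [List.foldl_append, List.foldl_cons]
    rw [foldA_even e st.1 st.2 hqe]
    rw [show tlStepA ((e.foldl tlStepEven (st.1, st.2)).1, (e.foldl tlStepEven (st.1, st.2)).2, false) '"'
          = ((e.foldl tlStepEven (st.1, st.2)).1, (e.foldl tlStepEven (st.1, st.2)).2, true) by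
        simp [tlStepA]]
    rw [tlJoin_cons o rest2 hr]
    simp only [List.foldl_append, List.foldl_cons]
    rw [foldA_odd o _ _ hqo]
    rw [show tlStepA ((e.foldl tlStepEven (st.1, st.2)).1, (e.foldl tlStepEven (st.1, st.2)).2 ++ o, true) '"'
          = ((e.foldl tlStepEven (st.1, st.2)).1 ++ [String.mk ((e.foldl tlStepEven (st.1, st.2)).2 ++ o)], [], false) by
        simp [tlStepA]]
    rw [show tlGo (e :: o :: rest2) (st.1, st.2) = tlGo rest2
          ((e.foldl tlStepEven (st.1, st.2)).1 ++ [String.mk ((e.foldl tlStepEven (st.1, st.2)).2 ++ o)], []) by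
        simp [tlGo, hr]]
    exact ih (fun seg hs => hq seg (by simp [hs]))

-- ===== VERDICT (by name: the statement is the Claim_ definition above) =====
theorem tokenize_line_spec : Claim_equal_tokenize_line := by
  intro line _
  unfold Spec_tokenize_line
  show tlFinish ((line.toList.foldl tlStepA ([], [], false)).1,
                 (line.toList.foldl tlStepA ([], [], false)).2.1) =
       tlFinish ((PySem.List.enumerate (PySem.Chars.splitOn line.toList ['"'])).foldl
                   (tlStepB (PySem.Chars.splitOn line.toList ['"']).length) ([], []))
  rw [splitOn_eq_tlSplit]
  have hB := foldB_eq_tlGo (tlSplit line.toList []).length (tlSplit line.toList []) ([], []) 0 (by omega)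
  simp only [Nat.mul_zero, Nat.cast_zero] at hB
  rw [hB]
  have hA := tlGo_correct (tlSplit line.toList []) ([], []) (tlSplit_no_quote line.toList [] (by simp))
  conv_lhs => rw [show line.toList = tlJoin (tlSplit line.toList []) by rw [tlJoin_tlSplit]; simp]
  exact hA
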